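-- pv_equiv track=rewrite | github.com/Mart1n66/school | python/fundamentals/intervaly.5.py | F
-- ===== SOURCE A (Python) =====
-- def F(t):
--     for i in range(len(t)):
--         pocet = 0
--         for j in range(len(t)):
--             if i != j:
--                 if t[i][0] <= t[j][0] and t[i][1] >= t[j][1]:
--                     pocet += 1
--             if pocet == len(t) - 1:
--                 return True
--     return False
-- ===== SOURCE B (Python) =====
-- def F(t):
--     if not t:
--         return False
--     mn = min(a for a, _ in t)
--     mx = max(b for _, b in t)
--     return any(a == mn and b == mx for a, b in t)
-- ===== Notes on version B (the rewrite author's own statement) =====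
-- stated objective: faster
-- what changed: Replaces the quadratic all-pairs containment scan with one pass computing the global minimum start and maximum end and checking whether some interval attains both.
import Mathlib
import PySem

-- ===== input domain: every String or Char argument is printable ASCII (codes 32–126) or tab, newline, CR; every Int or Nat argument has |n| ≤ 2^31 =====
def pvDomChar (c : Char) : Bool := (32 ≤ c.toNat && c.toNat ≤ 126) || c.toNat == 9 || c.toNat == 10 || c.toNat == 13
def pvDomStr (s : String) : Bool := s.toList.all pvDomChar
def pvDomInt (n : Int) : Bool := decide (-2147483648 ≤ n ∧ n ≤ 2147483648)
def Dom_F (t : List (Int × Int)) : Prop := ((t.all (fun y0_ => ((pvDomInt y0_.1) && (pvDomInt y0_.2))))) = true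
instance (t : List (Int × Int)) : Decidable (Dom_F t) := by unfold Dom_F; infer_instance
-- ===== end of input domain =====

-- B replaces the quadratic all-pairs containment scan by one linear pass: the global
-- min start / max end, and a check whether some interval attains both (objective: faster).

-- ===== PORT A =====
-- the inner-loop condition of A: i != j and t[i][0] <= t[j][0] and t[i][1] >= t[j][1]
def pvCond (t : List (Int × Int)) (i j : Nat) : Bool :=
  decide (i ≠ j) &&
    (decide ((t.getD i (0, 0)).1 ≤ (t.getD j (0, 0)).1) &&
     decide ((t.getD i (0, 0)).2 ≥ (t.getD j (0, 0)).2))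

-- inner 'for j' loop with accumulator pocet and the early 'return True'
def pvInner (t : List (Int × Int)) (i : Nat) : List Nat → Int → Bool
  | [], _ => false
  | j :: js, pocet =>
    let pocet' := if pvCond t i j then pocet + 1 else pocet
    if pocet' = (t.length : Int) - 1 then true else pvInner t i js pocet'

-- outer 'for i' loop
def pvOuter (t : List (Int × Int)) : List Nat → Bool
  | [] => false
  | i :: is => if pvInner t i (List.range t.length) 0 then true else pvOuter t is

def F (t : List (Int × Int)) : Bool := pvOuter t (List.range t.length)

-- ===== PORT B =====
def F_alt (t : List (Int × Int)) : Bool :=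
  match t with
  | [] => false
  | x :: xs =>
    let mn := xs.foldl (fun m p => min m p.1) x.1
    let mx := xs.foldl (fun m p => max m p.2) x.2
    (x :: xs).any (fun p => p.1 == mn && p.2 == mx)

-- ===== PRECONDITION & SPEC =====
def Spec_F (t : List (Int × Int)) (out : Bool) : Prop := out = F_alt t
instance (t : List (Int × Int)) (out : Bool) : Decidable (Spec_F t out) := by unfold Spec_F; infer_instance

-- ===== CLAIM (what is proved, stated in full; the proofs are below) =====
def Claim_equal_F : Prop := ∀ (t : List (Int × Int)), Dom_F t → Spec_F t (F t)

-- ===== LEMMAS AND PROOFS =====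

-- containment of t[j] in t[i], without the i ≠ j guard (true at j = i)
def pvCont (t : List (Int × Int)) (i j : Nat) : Bool :=
  decide ((t.getD i (0, 0)).1 ≤ (t.getD j (0, 0)).1) &&
  decide ((t.getD j (0, 0)).2 ≤ (t.getD i (0, 0)).2)

-- the common characterisation both programs are proved equal to
def pvGood (t : List (Int × Int)) : Bool :=
  t.any (fun p => t.all (fun q => decide (p.1 ≤ q.1) && decide (q.2 ≤ p.2)))

theorem pvInner_iff (t : List (Int × Int)) (i : Nat) (js : List Nat) (pocet : Int)
    (h2 : pocet + (js.countP (pvCond t i) : Int) ≤ (t.length : Int) - 1) :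
    pvInner t i js pocet = true ↔
      js ≠ [] ∧ pocet + (js.countP (pvCond t i) : Int) = (t.length : Int) - 1 := by
  induction js generalizing pocet with
  | nil => simp [pvInner]
  | cons j js ih =>
    rw [List.countP_cons] at h2 ⊢
    by_cases hc : pvCond t i j = true
    · simp only [pvInner, hc, if_pos]
      by_cases hend : pocet + 1 = (t.length : Int) - 1
      · rw [if_pos hend]
        have hcnt : (js.countP (pvCond t i) : Int) = 0 := by
          simp only [hc] at h2; push_cast at h2
          have := Int.natCast_nonneg (js.countP (pvCond t i)); omega
        simp only [true_iff]
        exact ⟨List.cons_ne_nil _ _, by push_cast; omega⟩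
      · rw [if_neg hend, ih (pocet + 1) (by simp only [hc] at h2; push_cast at h2 ⊢; omega)]
        constructor
        · rintro ⟨_, heq⟩
          exact ⟨List.cons_ne_nil _ _, by omega⟩
        · rintro ⟨_, heq⟩
          push_cast at heq
          refine ⟨?_, by omega⟩
          rintro rfl
          simp at heq; omega
    · simp only [pvInner, hc, Bool.false_eq_true, if_false]
      by_cases hend : pocet = (t.length : Int) - 1
      · rw [if_pos hend]
        have hcnt : (js.countP (pvCond t i) : Int) = 0 := by
          simp only [hc] at h2; push_cast at h2
          have := Int.natCast_nonneg (js.countP (pvCond t i)); omega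
        simp only [true_iff]
        exact ⟨List.cons_ne_nil _ _, by push_cast; omega⟩
      · rw [if_neg hend, ih pocet (by simp only [hc] at h2; push_cast at h2 ⊢; omega)]
        constructor
        · rintro ⟨_, heq⟩
          exact ⟨List.cons_ne_nil _ _, by omega⟩
        · rintro ⟨_, heq⟩
          push_cast at heq
          refine ⟨?_, by omega⟩
          rintro rfl
          simp at heq
          exact hend (by omega)


theorem pvOuter_eq_any (t : List (Int × Int)) (is : List Nat) :
    pvOuter t is = is.any (fun i => pvInner t i (List.range t.length) 0) := by
  induction is with
  | nil => rfl
  | cons i is ih =>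
    simp only [pvOuter, List.any_cons, ← ih]
    by_cases h : pvInner t i (List.range t.length) 0 = true <;> simp [h]

theorem pvCont_self (t : List (Int × Int)) (i : Nat) : pvCont t i i = true := by
  simp [pvCont]

theorem pvCond_eq (t : List (Int × Int)) (i j : Nat) :
    pvCond t i j = (pvCont t i j && decide (i ≠ j)) := by
  simp only [pvCond, pvCont, ge_iff_le]
  cases decide (i ≠ j) <;> cases decide ((t.getD i (0,0)).1 ≤ (t.getD j (0,0)).1) <;>
    cases decide ((t.getD j (0,0)).2 ≤ (t.getD i (0,0)).2) <;> rfl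

theorem countP_cond_eq (t : List (Int × Int)) (i : Nat) :
    (List.range t.length).countP (pvCond t i) =
      ((List.range t.length).filter (fun j => decide (i ≠ j))).countP (pvCont t i) := by
  rw [List.countP_filter]
  exact List.countP_congr (fun j _ => by rw [pvCond_eq])

theorem length_filter_ne (n i : Nat) (hi : i < n) :
    ((List.range n).filter (fun j => decide (i ≠ j))).length = n - 1 := by
  induction n with
  | zero => omega
  | succ n ih =>
    rw [List.range_succ, List.filter_append]
    by_cases h : i = n
    · subst h
      have h1 : (List.range i).filter (fun j => decide (i ≠ j)) = List.range i := by
        apply List.filter_eq_self.mpr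
        intro j hj
        simp only [List.mem_range] at hj
        simp; omega
      have h2 : (List.filter (fun j => decide (i ≠ j)) [i]) = [] := by simp
      rw [List.length_append, h1, h2]
      simp
    · have hi' : i < n := by omega
      have h2 : (List.filter (fun j => decide (i ≠ j)) [n]) = [n] := by simp [h]
      rw [List.length_append, ih hi', h2]
      simp; omega

theorem pvInner_start_iff (t : List (Int × Int)) (i : Nat) (hi : i < t.length) :
    pvInner t i (List.range t.length) 0 = true ↔
      ∀ j, j < t.length → pvCont t i j = true := by
  have hfl := length_filter_ne t.length i hi
  have hle : (List.range t.length).countP (pvCond t i) ≤ t.length - 1 := by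
    rw [countP_cond_eq]
    calc _ ≤ ((List.range t.length).filter (fun j => decide (i ≠ j))).length :=
          List.countP_le_length
      _ = t.length - 1 := hfl
  have hne : List.range t.length ≠ [] := by
    intro h; rw [List.range_eq_nil] at h; omega
  rw [pvInner_iff t i (List.range t.length) 0 (by omega)]
  constructor
  · rintro ⟨-, heq⟩
    have hcnt : (List.range t.length).countP (pvCond t i) = t.length - 1 := by omega
    rw [countP_cond_eq, ← hfl] at hcnt
    have hall := List.countP_eq_length.mp hcnt
    intro j hj
    by_cases hji : j = i
    · subst hji; exact pvCont_self t j
    · exact hall j (by simp [List.mem_filter, List.mem_range]; omega)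
  · intro hall
    refine ⟨hne, ?_⟩
    have hcnt : (List.range t.length).countP (pvCond t i) = t.length - 1 := by
      rw [countP_cond_eq, ← hfl]
      apply List.countP_eq_length.mpr
      intro j hj
      simp only [List.mem_filter, List.mem_range] at hj
      exact hall j hj.1
    rw [hcnt]; omega

theorem F_iff (t : List (Int × Int)) :
    F t = true ↔ ∃ i, i < t.length ∧ ∀ j, j < t.length → pvCont t i j = true := by
  rw [F, pvOuter_eq_any, List.any_eq_true]
  constructor
  · rintro ⟨i, hi, h⟩
    rw [List.mem_range] at hi
    exact ⟨i, hi, (pvInner_start_iff t i hi).mp h⟩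
  · rintro ⟨i, hi, h⟩
    exact ⟨i, List.mem_range.mpr hi, (pvInner_start_iff t i hi).mpr h⟩

theorem F_iff_mem (t : List (Int × Int)) :
    F t = true ↔ ∃ p ∈ t, ∀ q ∈ t, p.1 ≤ q.1 ∧ q.2 ≤ p.2 := by
  rw [F_iff]
  constructor
  · rintro ⟨i, hi, h⟩
    refine ⟨t[i], List.getElem_mem hi, ?_⟩
    intro q hq
    obtain ⟨j, hj, rfl⟩ := List.mem_iff_getElem.mp hq
    have := h j hj
    simp only [pvCont, List.getD_eq_getElem _ _ hi, List.getD_eq_getElem _ _ hj,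
      Bool.and_eq_true, decide_eq_true_eq] at this
    exact this
  · rintro ⟨p, hp, h⟩
    obtain ⟨i, hi, rfl⟩ := List.mem_iff_getElem.mp hp
    refine ⟨i, hi, fun j hj => ?_⟩
    have := h t[j] (List.getElem_mem hj)
    simp only [pvCont, List.getD_eq_getElem _ _ hi, List.getD_eq_getElem _ _ hj,
      Bool.and_eq_true, decide_eq_true_eq]
    exact this

-- properties of the min/max folds of F_alt
theorem foldl_min_le (xs : List (Int × Int)) (a : Int) :
    xs.foldl (fun m p => min m p.1) a ≤ a ∧
      ∀ p ∈ xs, xs.foldl (fun m p => min m p.1) a ≤ p.1 := by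
  induction xs generalizing a with
  | nil => simp
  | cons x xs ih =>
    obtain ⟨h1, h2⟩ := ih (min a x.1)
    refine ⟨le_trans h1 (min_le_left _ _), ?_⟩
    intro p hp
    rcases List.mem_cons.mp hp with rfl | hp
    · exact le_trans h1 (min_le_right _ _)
    · exact h2 p hp

theorem foldl_min_attained (xs : List (Int × Int)) (a : Int) :
    xs.foldl (fun m p => min m p.1) a = a ∨
      ∃ p ∈ xs, xs.foldl (fun m p => min m p.1) a = p.1 := by
  induction xs generalizing a with
  | nil => simp
  | cons x xs ih =>
    rcases ih (min a x.1) with h | ⟨p, hp, h⟩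
    · rcases min_choice a x.1 with hm | hm
      · left; rw [List.foldl_cons, h, hm]
      · right; exact ⟨x, List.mem_cons_self, by rw [List.foldl_cons, h, hm]⟩
    · right; exact ⟨p, List.mem_cons_of_mem _ hp, h⟩

theorem foldl_max_ge (xs : List (Int × Int)) (a : Int) :
    a ≤ xs.foldl (fun m p => max m p.2) a ∧
      ∀ p ∈ xs, p.2 ≤ xs.foldl (fun m p => max m p.2) a := by
  induction xs generalizing a with
  | nil => simp
  | cons x xs ih =>
    obtain ⟨h1, h2⟩ := ih (max a x.2)
    refine ⟨le_trans (le_max_left _ _) h1, ?_⟩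
    intro p hp
    rcases List.mem_cons.mp hp with rfl | hp
    · exact le_trans (le_max_right _ _) h1
    · exact h2 p hp

theorem foldl_max_attained (xs : List (Int × Int)) (a : Int) :
    xs.foldl (fun m p => max m p.2) a = a ∨
      ∃ p ∈ xs, xs.foldl (fun m p => max m p.2) a = p.2 := by
  induction xs generalizing a with
  | nil => simp
  | cons x xs ih =>
    rcases ih (max a x.2) with h | ⟨p, hp, h⟩
    · rcases max_choice a x.2 with hm | hm
      · left; rw [List.foldl_cons, h, hm]
      · right; exact ⟨x, List.mem_cons_self, by rw [List.foldl_cons, h, hm]⟩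
    · right; exact ⟨p, List.mem_cons_of_mem _ hp, h⟩

theorem F_alt_iff_mem (t : List (Int × Int)) :
    F_alt t = true ↔ ∃ p ∈ t, ∀ q ∈ t, p.1 ≤ q.1 ∧ q.2 ≤ p.2 := by
  match t with
  | [] => simp [F_alt]
  | x :: xs =>
    set mn := xs.foldl (fun m p => min m p.1) x.1 with hmn
    set mx := xs.foldl (fun m p => max m p.2) x.2 with hmx
    have hmnle : ∀ q ∈ x :: xs, mn ≤ q.1 := by
      intro q hq
      rcases List.mem_cons.mp hq with rfl | hq
      · exact (foldl_min_le xs q.1).1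
      · exact (foldl_min_le xs x.1).2 q hq
    have hmxge : ∀ q ∈ x :: xs, q.2 ≤ mx := by
      intro q hq
      rcases List.mem_cons.mp hq with rfl | hq
      · exact (foldl_max_ge xs q.2).1
      · exact (foldl_max_ge xs x.2).2 q hq
    have hmnat : ∃ p ∈ x :: xs, p.1 = mn := by
      rcases foldl_min_attained xs x.1 with h | ⟨p, hp, h⟩
      · exact ⟨x, List.mem_cons_self, h.symm⟩
      · exact ⟨p, List.mem_cons_of_mem _ hp, h.symm⟩
    have hmxat : ∃ p ∈ x :: xs, p.2 = mx := by
      rcases foldl_max_attained xs x.2 with h | ⟨p, hp, h⟩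
      · exact ⟨x, List.mem_cons_self, h.symm⟩
      · exact ⟨p, List.mem_cons_of_mem _ hp, h.symm⟩
    show (x :: xs).any (fun p => p.1 == mn && p.2 == mx) = true ↔ _
    rw [List.any_eq_true]
    constructor
    · rintro ⟨p, hp, hpe⟩
      simp only [Bool.and_eq_true, beq_iff_eq] at hpe
      refine ⟨p, hp, fun q hq => ⟨hpe.1 ▸ hmnle q hq, hpe.2 ▸ hmxge q hq⟩⟩
    · rintro ⟨p, hp, h⟩
      refine ⟨p, hp, ?_⟩
      simp only [Bool.and_eq_true, beq_iff_eq]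
      obtain ⟨pm, hpm, hpm1⟩ := hmnat
      obtain ⟨px, hpx, hpx2⟩ := hmxat
      constructor
      · exact le_antisymm (hpm1 ▸ (h pm hpm).1) (hmnle p hp)
      · exact le_antisymm (hmxge p hp) (hpx2 ▸ (h px hpx).2)

-- ===== VERDICT (by name: the statement is the Claim_ definition above) =====
theorem F_spec : Claim_equal_F := by
  intro t _
  unfold Spec_F
  rw [Bool.eq_iff_iff, F_iff_mem, F_alt_iff_mem]
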